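-- pv_equiv track=rewrite | github.com/ynsong/Introduction-to-Computer-Science | a03/a03q3.py | is_password_uppercase
-- ===== SOURCE A (Python) =====
-- def is_password_uppercase(password):
--     n = len(password)
--     if n == 0:
--         return False
--     if password[(n - 1)].isupper():
--         return True
--     else:
--         return is_password_uppercase(password[:(n - 1)])
-- ===== SOURCE B (Python) =====
-- def is_password_uppercase(password):
--     for ch in password:
--         if ch.isupper():
--             return True
--     return False
-- ===== Notes on version B (the rewrite author's own statement) =====
-- stated objective: faster
-- what changed: Replaced the tail recursion that slices off the last character each step (quadratic string copying) with a single iterative front-to-back for-loop returning on the first uppercase character.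
import Mathlib
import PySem

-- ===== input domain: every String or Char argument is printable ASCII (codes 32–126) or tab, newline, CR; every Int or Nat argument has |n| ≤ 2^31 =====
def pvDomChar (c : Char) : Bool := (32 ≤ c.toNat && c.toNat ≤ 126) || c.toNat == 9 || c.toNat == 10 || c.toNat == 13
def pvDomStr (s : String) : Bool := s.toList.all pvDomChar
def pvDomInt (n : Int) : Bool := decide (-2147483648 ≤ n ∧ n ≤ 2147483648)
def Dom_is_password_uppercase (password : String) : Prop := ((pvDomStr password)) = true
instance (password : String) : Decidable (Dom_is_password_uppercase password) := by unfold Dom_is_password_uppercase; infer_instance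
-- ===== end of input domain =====

-- B replaces A's tail recursion (slice off the last char each step) with one iterative front-to-back scan returning on the first uppercase character; objective: simpler.
-- ===== PORT A =====
-- A, literally: n = len; if n == 0 return False; if last char isupper return True; else recurse on password[:n-1]
def pwUpperRecA (l : List Char) : Bool :=
  let n : Int := l.length
  if n = 0 then false
  else
    match PySem.List.pyGet? l (n - 1) with
    | none => false  -- unreachable: index n-1 is in range
    | some c =>
      if PySem.Chars.isupper c then true
      else pwUpperRecA (PySem.List.slice l none (some (n - 1)))
termination_by l.length
decreasing_by
  rename_i hn
  have hpos : 0 < l.length := by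
    by_contra h
    exact hn (by omega)
  rw [PySem.List.slice_to l (by omega : (0:Int) ≤ (l.length : Int) - 1)]
  have h1 : ((l.length : Int) - 1).toNat < l.length := by omega
  calc (l.take ((l.length : Int) - 1).toNat).length ≤ ((l.length : Int) - 1).toNat :=
        List.length_take_le _ _
    _ < l.length := h1

def is_password_uppercase (password : String) : Bool := pwUpperRecA password.toList

-- ===== PORT B =====
-- B, literally: for ch in password: if ch.isupper(): return True; return False
def pwUpperLoopB : List Char → Bool
  | [] => false
  | c :: rest => if PySem.Chars.isupper c then true else pwUpperLoopB rest

def is_password_uppercase_alt (password : String) : Bool := pwUpperLoopB password.toList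

-- ===== PRECONDITION & SPEC =====
def Spec_is_password_uppercase (password : String) (out : Bool) : Prop := out = is_password_uppercase_alt password
instance (password : String) (out : Bool) : Decidable (Spec_is_password_uppercase password out) := by unfold Spec_is_password_uppercase; infer_instance

-- ===== CLAIM (what is proved, stated in full; the proofs are below) =====
def Claim_equal_is_password_uppercase : Prop := ∀ (password : String), Dom_is_password_uppercase password → Spec_is_password_uppercase password (is_password_uppercase password)

-- ===== LEMMAS AND PROOFS =====

-- ===== VERDICT (by name: the statement is the Claim_ definition above) =====
lemma pwUpperLoopB_eq_any (l : List Char) : pwUpperLoopB l = l.any PySem.Chars.isupper := by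
  induction l with
  | nil => rfl
  | cons c rest ih =>
    cases h : PySem.Chars.isupper c <;> simp [pwUpperLoopB, h, ih]

lemma pwUpperRecA_eq_any (l : List Char) : pwUpperRecA l = l.any PySem.Chars.isupper := by
  induction hn0 : l.length using Nat.strong_induction_on generalizing l with
  | _ n ih =>
    subst hn0
    rw [pwUpperRecA]
    by_cases hl : l = []
    · subst hl; simp
    · have hpos : 0 < l.length := List.length_pos_iff.mpr hl
      have hn : ((l.length : Int)) ≠ 0 := by omega
      simp only [hn, if_false]
      have hsl : PySem.List.slice l none (some ((l.length : Int) - 1)) = l.dropLast := by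
        rw [PySem.List.slice_to l (by omega : (0:Int) ≤ (l.length : Int) - 1)]
        have : ((l.length : Int) - 1).toNat = l.length - 1 := by omega
        rw [this, List.dropLast_eq_take]
      have hget : PySem.List.pyGet? l ((l.length : Int) - 1) = some (l.getLast hl) := by
        have : ((l.length : Int) - 1) = ((l.length - 1 : Nat) : Int) := by omega
        rw [this, PySem.List.pyGet?_natCast]
        rw [List.getLast_eq_getElem]
        exact List.getElem?_eq_getElem (by omega)
      rw [hget]
      have hsub : l.dropLast.length < l.length := by
        simp [List.length_dropLast]; omega
      have ihd := ih l.dropLast.length (by simp [List.length_dropLast]; omega) l.dropLast rfl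
      conv_rhs => rw [← List.dropLast_append_getLast hl]
      simp only [hsl, ihd, List.any_append, List.any_cons, List.any_nil, Bool.or_false]
      by_cases h : PySem.Chars.isupper (l.getLast hl) <;> simp [h]

-- ===== VERDICT =====
theorem is_password_uppercase_spec : Claim_equal_is_password_uppercase := by
  intro password _
  unfold Spec_is_password_uppercase is_password_uppercase is_password_uppercase_alt
  rw [pwUpperRecA_eq_any, pwUpperLoopB_eq_any]
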